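-- pv_equiv track=rewrite | github.com/AntonioBrkovic01/PametniSemafor | config.py | get_nearest_intersection
-- ===== SOURCE A (Python) =====
-- INTERSECTIONS = {
--     'A': (400, 400),
--     'B': (800, 400),
-- }
--
-- def get_nearest_intersection(x, y, direction):
--     if direction in ['N', 'S']:
--         min_dist = float('inf')
--         nearest = 'A'
--         for int_id, (ix, iy) in INTERSECTIONS.items():
--             dist = abs(x - ix)
--             if dist < min_dist:
--                 min_dist = dist
--                 nearest = int_id
--         return nearest
--     else:
--         if direction == 'E':
--             for int_id in ['A', 'B']:
--                 ix, iy = INTERSECTIONS[int_id]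
--                 if x < ix:
--                     return int_id
--             return 'B'
--         else:
--             for int_id in ['B', 'A']:
--                 ix, iy = INTERSECTIONS[int_id]
--                 if x > ix:
--                     return int_id
--             return 'A'
-- ===== SOURCE B (Python) =====
-- INTERSECTIONS = {
--     'A': (400, 400),
--     'B': (800, 400),
-- }
--
-- def get_nearest_intersection(x, y, direction):
--     ax = INTERSECTIONS['A'][0]
--     bx = INTERSECTIONS['B'][0]
--     if direction in ('N', 'S'):
--         return 'A' if abs(x - ax) <= abs(x - bx) else 'B'
--     if direction == 'E':
--         return 'A' if x < ax else 'B'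
--     return 'B' if x > bx else 'A'
-- ===== Notes on version B (the rewrite author's own statement) =====
-- stated objective: simpler
-- what changed: Replaces the min-scan over the dict and the two short-circuit list loops with one closed-form comparison per direction branch (ties to A matching the strict-< first-wins scan).
import Mathlib
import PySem

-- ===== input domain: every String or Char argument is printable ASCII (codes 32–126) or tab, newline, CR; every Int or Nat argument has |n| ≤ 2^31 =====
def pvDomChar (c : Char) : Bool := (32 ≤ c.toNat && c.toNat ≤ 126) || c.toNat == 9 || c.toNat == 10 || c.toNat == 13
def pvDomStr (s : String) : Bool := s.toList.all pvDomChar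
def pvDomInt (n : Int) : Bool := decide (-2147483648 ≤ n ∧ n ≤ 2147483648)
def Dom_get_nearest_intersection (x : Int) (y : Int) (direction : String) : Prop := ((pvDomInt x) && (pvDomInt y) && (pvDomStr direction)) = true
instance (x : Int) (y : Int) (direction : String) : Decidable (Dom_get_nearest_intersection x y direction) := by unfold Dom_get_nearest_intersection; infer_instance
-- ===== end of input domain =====

-- B replaces A's dict min-scan and short-circuit list loops with one closed-form comparison
-- per direction branch (objective: simpler); same return value everywhere.

-- ===== PORT A =====
-- the module constant INTERSECTIONS, a dict in insertion order
def INTERSECTIONS : PySem.Dict String (Int × Int) :=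
  PySem.Dict.ofList [("A", (400, 400)), ("B", (800, 400))]

-- abs(n) on a Python int
def pyAbs (n : Int) : Int := if n < 0 then -n else n

-- the N/S min-scan over INTERSECTIONS.items: state = (min_dist, nearest); min_dist starts at
-- float('inf'), represented as `none` (every int dist compares < inf), thereafter `some m`.
def nsScan (x : Int) : Option Int × String :=
  INTERSECTIONS.items.foldl
    (fun st p =>
      let dist := pyAbs (x - p.2.1)
      match st.1 with
      | none => (some dist, p.1)
      | some m => if dist < m then (some dist, p.1) else st)
    (none, "A")

-- 'for int_id in ids: ix,iy = INTERSECTIONS[int_id]; if x < ix: return int_id' then 'return "B"'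
-- (dict lookup via getD: both looked-up keys are present in INTERSECTIONS, so Python never raises)
def eLoop (x : Int) : List String → String
  | [] => "B"
  | id :: rest =>
    if x < (PySem.Dict.getD INTERSECTIONS id ((0, 0) : Int × Int)).1 then id else eLoop x rest

-- same with 'x > ix' and fallback 'A'
def wLoop (x : Int) : List String → String
  | [] => "A"
  | id :: rest =>
    if x > (PySem.Dict.getD INTERSECTIONS id ((0, 0) : Int × Int)).1 then id else wLoop x rest

def get_nearest_intersection (x : Int) (y : Int) (direction : String) : String :=
  if direction == "N" || direction == "S" then
    (nsScan x).2
  else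
    if direction == "E" then
      eLoop x ["A", "B"]
    else
      wLoop x ["B", "A"]

-- ===== PORT B =====
def get_nearest_intersection_alt (x : Int) (y : Int) (direction : String) : String :=
  let ax := (PySem.Dict.getD INTERSECTIONS "A" ((0, 0) : Int × Int)).1
  let bx := (PySem.Dict.getD INTERSECTIONS "B" ((0, 0) : Int × Int)).1
  if direction == "N" || direction == "S" then
    if pyAbs (x - ax) ≤ pyAbs (x - bx) then "A" else "B"
  else
    if direction == "E" then
      if x < ax then "A" else "B"
    else
      if x > bx then "B" else "A"

-- ===== PRECONDITION & SPEC =====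
def Spec_get_nearest_intersection (x : Int) (y : Int) (direction : String) (out : String) : Prop := out = get_nearest_intersection_alt x y direction
instance (x : Int) (y : Int) (direction : String) (out : String) : Decidable (Spec_get_nearest_intersection x y direction out) := by unfold Spec_get_nearest_intersection; infer_instance

-- ===== CLAIM (what is proved, stated in full; the proofs are below) =====
def Claim_equal_get_nearest_intersection : Prop := ∀ (x : Int) (y : Int) (direction : String), Dom_get_nearest_intersection x y direction → Spec_get_nearest_intersection x y direction (get_nearest_intersection x y direction)

-- ===== LEMMAS AND PROOFS =====
theorem getD_A : (PySem.Dict.getD INTERSECTIONS "A" ((0, 0) : Int × Int)).1 = 400 := by decide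
theorem getD_B : (PySem.Dict.getD INTERSECTIONS "B" ((0, 0) : Int × Int)).1 = 800 := by decide
theorem items_eq : INTERSECTIONS.items = [("A", (400, 400)), ("B", (800, 400))] := by decide

theorem nsScan_eq (x : Int) :
    (nsScan x).2 = if pyAbs (x - 400) ≤ pyAbs (x - 800) then "A" else "B" := by
  simp only [nsScan, items_eq, List.foldl, pyAbs]
  split_ifs <;> simp_all <;> omega

-- ===== VERDICT (by name: the statement is the Claim_ definition above) =====
theorem get_nearest_intersection_spec : Claim_equal_get_nearest_intersection := by
  intro x y direction _
  unfold Spec_get_nearest_intersection get_nearest_intersection get_nearest_intersection_alt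
  simp only [getD_A, getD_B]
  by_cases hns : (direction == "N" || direction == "S") = true
  · simp only [hns, if_true, nsScan_eq]
  · by_cases he : (direction == "E") = true
    · simp only [hns, he, if_true, Bool.false_eq_true, if_false, eLoop, getD_A, getD_B]
      split_ifs <;> rfl
    · simp only [hns, he, Bool.false_eq_true, if_false, wLoop, getD_A, getD_B]
      split_ifs <;> rfl
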